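-- pv_equiv track=rewrite | github.com/neozenith/sqlite-vector-graph | benchmarks/scripts/benchmark_graph.py | python_dfs
-- ===== SOURCE A (Python) =====
-- def python_dfs(adj, start):
--     """DFS from start node. Returns [(node, depth)] in visit order."""
--     visited = []
--     seen = set()
--     stack = [(start, 0)]
--     while stack:
--         node, depth = stack.pop()
--         if node in seen:
--             continue
--         seen.add(node)
--         visited.append((node, depth))
--         # Push neighbors in reverse order for consistent ordering
--         for neighbor, _ in reversed(adj.get(node, [])):
--             if neighbor not in seen:
--                 stack.append((neighbor, depth + 1))
--     return visited
-- ===== SOURCE B (Python) =====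
-- def python_dfs(adj, start):
--     """DFS from start node. Returns [(node, depth)] in visit order."""
--     seen = {start}
--     visited = [(start, 0)]
--     # one frame per node: (children list, depth for those children, cursor)
--     stack = [(adj.get(start, []), 1, 0)]
--     while stack:
--         children, depth, i = stack.pop()
--         while i < len(children) and children[i][0] in seen:
--             i += 1
--         if i < len(children):
--             child = children[i][0]
--             stack.append((children, depth, i + 1))
--             seen.add(child)
--             visited.append((child, depth))
--             stack.append((adj.get(child, []), depth + 1, 0))
--     return visited
-- ===== Notes on version B (the rewrite author's own statement) =====
-- stated objective: alternative
-- what changed: Replaces the pop-time-marked stack of (node,depth) pairs (which pushes all not-yet-seen neighbors in reverse and may hold many duplicate entries) by a cursor-frame iterative DFS: one frame (children,depth,cursor) per discovered node, neighbors scanned forward, nodes marked and recorded at discovery, so the stack is bounded by the DFS depth and no duplicate frames are ever pushed.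
import Mathlib
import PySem

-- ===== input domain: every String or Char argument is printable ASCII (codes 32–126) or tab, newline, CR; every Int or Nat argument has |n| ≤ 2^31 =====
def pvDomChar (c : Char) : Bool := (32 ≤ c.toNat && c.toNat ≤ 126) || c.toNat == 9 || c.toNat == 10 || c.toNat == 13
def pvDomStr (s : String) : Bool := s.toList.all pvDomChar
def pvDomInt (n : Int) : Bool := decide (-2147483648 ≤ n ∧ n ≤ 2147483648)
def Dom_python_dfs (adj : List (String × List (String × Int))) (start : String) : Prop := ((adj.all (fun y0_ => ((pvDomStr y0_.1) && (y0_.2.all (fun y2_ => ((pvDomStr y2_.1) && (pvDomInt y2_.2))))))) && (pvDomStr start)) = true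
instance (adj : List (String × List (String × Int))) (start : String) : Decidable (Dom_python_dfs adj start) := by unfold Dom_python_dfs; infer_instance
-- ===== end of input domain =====

-- B replaces A's pop-time-marked stack of (node,depth) pairs (all unseen neighbors pushed in
-- reverse, duplicates possible) by a cursor-frame DFS: one (children, depth, cursor) frame per
-- discovered node, neighbors scanned forward, nodes marked and recorded at discovery
-- (objective: alternative — same asymptotic cost, stack bounded by DFS depth).

-- adj.get(node, []) on the dict argument: first-match lookup in the association list
-- (exact port of the dict→assoc-list convention, lookup = first match)
def pvAdjGet : List (String × List (String × Int)) → String → List (String × Int)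
  | [], _ => []
  | (k, v) :: rest, n => if k == n then v else pvAdjGet rest n

-- all node names that can ever enter `seen`: start, the keys, and every neighbor
def pvU (adj : List (String × List (String × Int))) (start : String) : List String :=
  start :: adj.flatMap (fun p => p.1 :: p.2.map Prod.fst)

-- total number of adjacency entries (bounds how many frames one visit can push)
def pvK (adj : List (String × List (String × Int))) : Nat :=
  (adj.map (fun p => p.2.length)).sum

-- number of universe nodes not yet seen (the loop variant component)
def pvCnt (adj : List (String × List (String × Int))) (start : String)
    (s : PySem.Set String) : Nat :=
  ((pvU adj start).filter (fun x => !(PySem.Set.contains s x))).length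

-- ===== PORT A =====
-- A's while loop; the Lean stack has its TOP AT THE HEAD (python list.append/pop at the end),
-- so python's "append reversed(adj.get(node,[]))" is a foldl of cons over the reversed list.
-- The fuel is a pre-computed strict upper bound on the number of iterations (proved sufficient
-- below: each iteration strictly decreases cnt*(K+1)+stack.length); it never runs out.
def pvLoopA (adj : List (String × List (String × Int))) (start : String) :
    Nat → List (String × Int) → PySem.Set String → List (String × Int)
  | 0, _, _ => []
  | _ + 1, [], _ => []
  | f + 1, (n, d) :: rest, seen =>
      if PySem.Set.contains seen n then pvLoopA adj start f rest seen
      else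
        let seen' := PySem.Set.add seen n
        (n, d) :: pvLoopA adj start f
          ((pvAdjGet adj n).reverse.foldl
            (fun st q => if PySem.Set.contains seen' q.1 then st else (q.1, d + 1) :: st) rest)
          seen'

def python_dfs (adj : List (String × List (String × Int))) (start : String) : List (String × Int) :=
  pvLoopA adj start (pvCnt adj start PySem.Set.empty * (pvK adj + 1) + 2) [(start, 0)] PySem.Set.empty

-- ===== PORT B =====
-- the inner `while i < len(children) and children[i][0] in seen: i += 1` of Source B
def pvSkip (seen : PySem.Set String) (ch : List (String × Int)) (i : Nat) : Nat :=
  if h : i < ch.length then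
    if PySem.Set.contains seen (ch[i].1) then pvSkip seen ch (i + 1) else i
  else i
  termination_by ch.length - i

-- Source B's outer while loop over cursor frames (stack top at head, as above); fuel likewise a
-- pre-computed strict iteration bound (proved sufficient below), it never runs out.
def pvLoopB (adj : List (String × List (String × Int))) (start : String) :
    Nat → List (List (String × Int) × Int × Nat) → PySem.Set String → List (String × Int)
  | 0, _, _ => []
  | _ + 1, [], _ => []
  | f + 1, (ch, d, i) :: rest, seen =>
      let j := pvSkip seen ch i
      if h : j < ch.length then
        (ch[j].1, d) :: pvLoopB adj start f
          ((pvAdjGet adj ch[j].1, d + 1, 0) :: (ch, d, j + 1) :: rest)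
          (PySem.Set.add seen ch[j].1)
      else pvLoopB adj start f rest seen

def python_dfs_alt (adj : List (String × List (String × Int))) (start : String) : List (String × Int) :=
  let s0 := PySem.Set.add PySem.Set.empty start
  (start, 0) :: pvLoopB adj start
    (pvCnt adj start s0 * (2 * pvK adj + 2) + 2 * pvK adj + 2)
    [(pvAdjGet adj start, 1, 0)] s0

-- ===== PRECONDITION & SPEC =====
def Spec_python_dfs (adj : List (String × List (String × Int))) (start : String) (out : List (String × Int)) : Prop := out = python_dfs_alt adj start
instance (adj : List (String × List (String × Int))) (start : String) (out : List (String × Int)) : Decidable (Spec_python_dfs adj start out) := by unfold Spec_python_dfs; infer_instance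

-- ===== CLAIM (what is proved, stated in full; the proofs are below) =====
def Claim_equal_python_dfs : Prop := ∀ (adj : List (String × List (String × Int))) (start : String), Dom_python_dfs adj start → Spec_python_dfs adj start (python_dfs adj start)

-- ===== LEMMAS AND PROOFS =====

-- recursive-DFS reference used only in the proofs: visit n at depth d, then fold over children
def pvFold (step : String → Int → PySem.Set String → List (String × Int) × PySem.Set String) :
    List (String × Int) → Int → PySem.Set String → List (String × Int) × PySem.Set String
  | [], _, s => ([], s)
  | (m, _) :: ms, d, s =>
      let r1 := step m d s
      let r2 := pvFold step ms d r1.2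
      (r1.1 ++ r2.1, r2.2)

def pvDfs (adj : List (String × List (String × Int))) (start : String) :
    Nat → String → Int → PySem.Set String → List (String × Int) × PySem.Set String
  | 0, _, _, s => ([], s)
  | f + 1, n, d, s =>
      if PySem.Set.contains s n then ([], s)
      else
        let r := pvFold (pvDfs adj start f) (pvAdjGet adj n) (d + 1) (PySem.Set.add s n)
        ((n, d) :: r.1, r.2)

def pvF (adj : List (String × List (String × Int))) (start : String) : Nat :=
  pvCnt adj start PySem.Set.empty + 1

def pvD1 (adj : List (String × List (String × Int))) (start : String)
    (n : String) (d : Int) (s : PySem.Set String) : List (String × Int) × PySem.Set String :=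
  pvDfs adj start (pvF adj start) n d s

def pvDL (adj : List (String × List (String × Int))) (start : String)
    (l : List (String × Int)) (d : Int) (s : PySem.Set String) :
    List (String × Int) × PySem.Set String :=
  pvFold (pvDfs adj start (pvF adj start)) l d s

def pvRunA (adj : List (String × List (String × Int))) (start : String) :
    List (String × Int) → PySem.Set String → List (String × Int)
  | [], _ => []
  | (n, d) :: rest, s => (pvD1 adj start n d s).1 ++ pvRunA adj start rest (pvD1 adj start n d s).2

def pvRunB (adj : List (String × List (String × Int))) (start : String) :
    List (List (String × Int) × Int × Nat) → PySem.Set String → List (String × Int)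
  | [], _ => []
  | (ch, d, i) :: rest, s =>
      (pvDL adj start (ch.drop i) d s).1 ++ pvRunB adj start rest (pvDL adj start (ch.drop i) d s).2

def pvW (frames : List (List (String × Int) × Int × Nat)) : Nat :=
  (frames.map (fun fr => 2 * (fr.1.length - fr.2.2) + 1)).sum

theorem pvSub_trans {a b c : List String} (h1 : a ⊆ b) (h2 : b ⊆ c) : a ⊆ c := by
  intro x hx; exact h2 (h1 hx)

theorem pvSubset_add (s : PySem.Set String) (n : String) : s ⊆ PySem.Set.add s n := by
  intro x hx; rw [PySem.Set.mem_add]; exact Or.inl hx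

theorem pvCT {s : PySem.Set String} {x : String} (h : x ∈ s) :
    PySem.Set.contains s x = true := (PySem.Set.contains_iff _ _).mpr h

theorem pvCM {s : PySem.Set String} {x : String} (h : PySem.Set.contains s x = true) :
    x ∈ s := (PySem.Set.contains_iff _ _).mp h

theorem pvCF {s : PySem.Set String} {x : String} (h : x ∉ s) :
    PySem.Set.contains s x = false := by
  cases hc : PySem.Set.contains s x
  · rfl
  · exact absurd (pvCM hc) h

theorem pvFilterLen_le {p q : String → Bool} (h : ∀ x, p x = true → q x = true)
    (l : List String) :
    (l.filter fun x => !q x).length ≤ (l.filter fun x => !p x).length := by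
  induction l with
  | nil => exact Nat.le_refl _
  | cons x xs ih =>
    simp only [List.filter_cons]
    cases hp : p x <;> cases hq : q x
    · simp [hp, hq]; omega
    · simp [hp, hq]; omega
    · rw [h x hp] at hq; cases hq
    · simp [hp, hq]; omega

theorem pvFilterLen_lt {p q : String → Bool} (h : ∀ x, p x = true → q x = true)
    {n : String} (hn : q n = true) (hp : p n = false) :
    ∀ l : List String, n ∈ l →
      (l.filter fun x => !q x).length < (l.filter fun x => !p x).length := by
  intro l hl
  induction l with
  | nil => cases hl
  | cons x xs ih =>
    simp only [List.filter_cons]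
    by_cases hx : x = n
    · subst hx
      rw [hn, hp]
      have := pvFilterLen_le h xs
      simp; omega
    · have hxs : n ∈ xs := by
        rcases List.mem_cons.mp hl with h' | h'
        · exact absurd h'.symm hx
        · exact h'
      have := ih hxs
      cases hpx : p x <;> cases hqx : q x
      · simp [hpx, hqx]; omega
      · simp [hpx, hqx]; omega
      · rw [h x hpx] at hqx; cases hqx
      · simp [hpx, hqx]; omega

theorem pvCnt_le_of_subset (adj : List (String × List (String × Int))) (start : String)
    {s s' : PySem.Set String} (h : s ⊆ s') : pvCnt adj start s' ≤ pvCnt adj start s := by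
  unfold pvCnt
  exact pvFilterLen_le (fun x hx => pvCT (h (pvCM hx))) _

theorem pvCnt_lt_add (adj : List (String × List (String × Int))) (start : String)
    {s : PySem.Set String} {n : String} (hU : n ∈ pvU adj start)
    (hn : ¬ n ∈ s) : pvCnt adj start (PySem.Set.add s n) < pvCnt adj start s := by
  unfold pvCnt
  exact pvFilterLen_lt (p := fun x => PySem.Set.contains s x)
    (q := fun x => PySem.Set.contains (PySem.Set.add s n) x)
    (fun x hx => pvCT (pvSubset_add s n (pvCM hx)))
    (pvCT ((PySem.Set.mem_add _ _ _).mpr (Or.inr rfl))) (pvCF hn) _ hU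

theorem pvAdjGet_nil (adj : List (String × List (String × Int))) (start : String)
    {n : String} (h : ¬ n ∈ pvU adj start) : pvAdjGet adj n = [] := by
  have hk : ∀ p ∈ adj, p.1 ≠ n := by
    intro p hp he
    exact h (by simp [pvU, List.mem_flatMap]; exact Or.inr ⟨p.1, p.2, hp, Or.inl he.symm⟩)
  clear h
  induction adj with
  | nil => rfl
  | cons p rest ih =>
    obtain ⟨k, v⟩ := p
    simp only [pvAdjGet]
    have : (k == n) = false := by
      have := hk (k, v) List.mem_cons_self
      simpa using this
    rw [this]
    simp only [Bool.false_eq_true, if_false]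
    exact ih (fun p hp => hk p (List.mem_cons_of_mem _ hp))

theorem pvAdjGet_le_K (adj : List (String × List (String × Int))) (n : String) :
    (pvAdjGet adj n).length ≤ pvK adj := by
  induction adj with
  | nil => simp [pvAdjGet]
  | cons p rest ih =>
    obtain ⟨k, v⟩ := p
    simp only [pvAdjGet, pvK, List.map_cons, List.sum_cons]
    simp only [pvK] at ih
    split <;> omega

theorem pvFold_mono {step : String → Int → PySem.Set String → List (String × Int) × PySem.Set String}
    (hstep : ∀ m d s, s ⊆ (step m d s).2) :
    ∀ (l : List (String × Int)) (d : Int) (s : PySem.Set String), s ⊆ (pvFold step l d s).2 := by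
  intro l
  induction l with
  | nil => intro d s; simp [pvFold]
  | cons p ms ih =>
    intro d s
    obtain ⟨m, w⟩ := p
    simp only [pvFold]
    exact pvSub_trans (hstep m d s) (ih d _)

theorem pvDfs_mono (adj : List (String × List (String × Int))) (start : String) :
    ∀ (f : Nat) (n : String) (d : Int) (s : PySem.Set String), s ⊆ (pvDfs adj start f n d s).2 := by
  intro f
  induction f with
  | zero => intro n d s; simp [pvDfs]
  | succ f ih =>
    intro n d s
    simp only [pvDfs]
    split
    · exact fun _ h => h
    · exact pvSub_trans (pvSubset_add s n) (pvFold_mono (fun m d' s' => ih m d' s') _ _ _)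

theorem pvFold_congr {step1 step2 : String → Int → PySem.Set String → List (String × Int) × PySem.Set String}
    {s0 : PySem.Set String}
    (h1 : ∀ m d s, s ⊆ (step1 m d s).2)
    (h : ∀ m d (s : PySem.Set String), s0 ⊆ s → step1 m d s = step2 m d s) :
    ∀ (l : List (String × Int)) (d : Int) (s : PySem.Set String), s0 ⊆ s →
      pvFold step1 l d s = pvFold step2 l d s := by
  intro l
  induction l with
  | nil => intro d s hs; rfl
  | cons p ms ih =>
    intro d s hs
    obtain ⟨m, w⟩ := p
    simp only [pvFold]
    rw [← h m d s hs, ih d _ (pvSub_trans hs (h1 m d s))]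

theorem pvDfs_stab (adj : List (String × List (String × Int))) (start : String) :
    ∀ (f g : Nat) (n : String) (d : Int) (s : PySem.Set String),
      pvCnt adj start s < f → pvCnt adj start s < g →
      pvDfs adj start f n d s = pvDfs adj start g n d s := by
  intro f
  induction f with
  | zero => intro g n d s hf _; exact absurd hf (Nat.not_lt_zero _)
  | succ f ih =>
    intro g n d s hf hg
    cases g with
    | zero => exact absurd hg (Nat.not_lt_zero _)
    | succ g =>
      simp only [pvDfs]
      cases hc : PySem.Set.contains s n
      · simp only [Bool.false_eq_true, if_false]
        by_cases hU : n ∈ pvU adj start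
        · have hlt : pvCnt adj start (PySem.Set.add s n) < pvCnt adj start s :=
            pvCnt_lt_add adj start hU (fun hm => by rw [pvCT hm] at hc; cases hc)
          have hfold : pvFold (pvDfs adj start f) (pvAdjGet adj n) (d + 1) (PySem.Set.add s n)
              = pvFold (pvDfs adj start g) (pvAdjGet adj n) (d + 1) (PySem.Set.add s n) := by
            refine pvFold_congr (fun m d' s' => pvDfs_mono adj start f m d' s')
              (fun m d' s' hsub => ?_) _ _ _ (fun x hx => hx)
            have hcs : pvCnt adj start s' ≤ pvCnt adj start (PySem.Set.add s n) :=
              pvCnt_le_of_subset adj start hsub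
            exact ih g m d' s' (by omega) (by omega)
          rw [hfold]
        · rw [pvAdjGet_nil adj start hU]; simp [pvFold]
      · simp


theorem pvD1_seen (adj : List (String × List (String × Int))) (start : String)
    {n : String} {d : Int} {s : PySem.Set String} (h : PySem.Set.contains s n = true) :
    pvD1 adj start n d s = ([], s) := by
  show pvDfs adj start (pvCnt adj start PySem.Set.empty + 1) n d s = ([], s)
  simp only [pvDfs]
  rw [h]
  simp

theorem pvD1_fresh (adj : List (String × List (String × Int))) (start : String)
    {n : String} {d : Int} {s : PySem.Set String} (h : PySem.Set.contains s n = false) :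
    pvD1 adj start n d s =
      ((n, d) :: (pvDL adj start (pvAdjGet adj n) (d + 1) (PySem.Set.add s n)).1,
       (pvDL adj start (pvAdjGet adj n) (d + 1) (PySem.Set.add s n)).2) := by
  show pvDfs adj start (pvCnt adj start PySem.Set.empty + 1) n d s = _
  simp only [pvDfs, h, Bool.false_eq_true, if_false]
  have hfold : pvFold (pvDfs adj start (pvCnt adj start PySem.Set.empty))
      (pvAdjGet adj n) (d + 1) (PySem.Set.add s n)
      = pvDL adj start (pvAdjGet adj n) (d + 1) (PySem.Set.add s n) := by
    unfold pvDL
    by_cases hU : n ∈ pvU adj start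
    · have hlt : pvCnt adj start (PySem.Set.add s n) < pvCnt adj start s :=
        pvCnt_lt_add adj start hU (fun hm => by rw [pvCT hm] at h; cases h)
      have hle : pvCnt adj start s ≤ pvCnt adj start PySem.Set.empty :=
        pvCnt_le_of_subset adj start (by intro x hx; cases hx)
      refine pvFold_congr (fun m d' s' => pvDfs_mono adj start _ m d' s')
        (fun m d' s' hsub => ?_) _ _ _ (fun x hx => hx)
      have hcs : pvCnt adj start s' ≤ pvCnt adj start (PySem.Set.add s n) :=
        pvCnt_le_of_subset adj start hsub
      exact pvDfs_stab adj start _ _ m d' s' (by omega) (by unfold pvF; omega)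
    · rw [pvAdjGet_nil adj start hU]; rfl
  rw [hfold]

theorem pvPush_eq (s : PySem.Set String) (l : List (String × Int)) (d : Int)
    (rest : List (String × Int)) :
    l.reverse.foldl (fun st q => if PySem.Set.contains s q.1 then st else (q.1, d) :: st) rest
      = (l.filter (fun q => !(PySem.Set.contains s q.1))).map (fun q => (q.1, d)) ++ rest := by
  rw [List.foldl_reverse]
  induction l with
  | nil => simp
  | cons p l ih =>
    obtain ⟨m, w⟩ := p
    simp only [List.foldr_cons, ih, List.filter_cons]
    cases hm : PySem.Set.contains s m <;> simp

theorem pvRunA_filter (adj : List (String × List (String × Int))) (start : String)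
    (d : Int) (rest : List (String × Int)) :
    ∀ (l : List (String × Int)) (s0 s : PySem.Set String), s0 ⊆ s →
      pvRunA adj start ((l.filter (fun q => !(PySem.Set.contains s0 q.1))).map (fun q => (q.1, d)) ++ rest) s
        = (pvDL adj start l d s).1 ++ pvRunA adj start rest (pvDL adj start l d s).2 := by
  intro l
  induction l with
  | nil =>
    intro s0 s hs
    simp [pvDL, pvFold, pvRunA]
  | cons p ms ih =>
    intro s0 s hs
    obtain ⟨m, w⟩ := p
    cases hm : PySem.Set.contains s0 m
    · -- kept on the left
      simp only [List.filter_cons, hm, Bool.not_false, if_true, List.map_cons, List.cons_append]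
      have hstep : pvDfs adj start (pvF adj start) m d s = pvD1 adj start m d s := rfl
      simp only [pvRunA]
      rw [ih s0 (pvD1 adj start m d s).2
        (pvSub_trans hs (pvDfs_mono adj start (pvF adj start) m d s))]
      show (pvD1 adj start m d s).1 ++
          ((pvDL adj start ms d (pvD1 adj start m d s).2).1 ++
            pvRunA adj start rest (pvDL adj start ms d (pvD1 adj start m d s).2).2) = _
      unfold pvDL
      simp only [pvFold, hstep, List.append_assoc]
    · -- dropped on the left, no-op on the right
      have hms : PySem.Set.contains s m = true := pvCT (hs (pvCM hm))
      simp only [List.filter_cons, hm, Bool.not_true, Bool.false_eq_true, if_false]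
      rw [ih s0 s hs]
      have hred : pvDL adj start ((m, w) :: ms) d s = pvDL adj start ms d s := by
        unfold pvDL
        simp only [pvFold]
        rw [show pvDfs adj start (pvF adj start) m d s = ([], s) from pvD1_seen adj start hms]
        simp
      rw [hred]

theorem pvLoopA_eq (adj : List (String × List (String × Int))) (start : String) :
    ∀ (f : Nat) (stack : List (String × Int)) (s : PySem.Set String),
      pvCnt adj start s * (pvK adj + 1) + stack.length < f →
      pvLoopA adj start f stack s = pvRunA adj start stack s := by
  intro f
  induction f with
  | zero => intro stack s h; exact absurd h (Nat.not_lt_zero _)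
  | succ f ih =>
    intro stack s hmu
    cases stack with
    | nil => simp [pvLoopA, pvRunA]
    | cons p rest =>
      obtain ⟨n, d⟩ := p
      simp only [pvLoopA]
      cases hc : PySem.Set.contains s n
      · simp only [Bool.false_eq_true, if_false]
        rw [pvPush_eq]
        have hK := pvAdjGet_le_K adj n
        have hflt : ((pvAdjGet adj n).filter fun q =>
            !PySem.Set.contains (PySem.Set.add s n) q.1).length ≤ (pvAdjGet adj n).length :=
          List.length_filter_le _ _
        have hcle : pvCnt adj start (PySem.Set.add s n) ≤ pvCnt adj start s :=
          pvCnt_le_of_subset adj start (pvSubset_add s n)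
        simp only [List.length_cons] at hmu
        have hnew : pvCnt adj start (PySem.Set.add s n) * (pvK adj + 1) +
            (((pvAdjGet adj n).filter fun q => !PySem.Set.contains (PySem.Set.add s n) q.1).map
              (fun q => (q.1, d + 1)) ++ rest).length < f := by
          rw [List.length_append, List.length_map]
          by_cases hU : n ∈ pvU adj start
          · have hlt : pvCnt adj start (PySem.Set.add s n) + 1 ≤ pvCnt adj start s :=
              pvCnt_lt_add adj start hU (fun hm => by rw [pvCT hm] at hc; cases hc)
            have hmul : (pvCnt adj start (PySem.Set.add s n) + 1) * (pvK adj + 1) ≤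
                pvCnt adj start s * (pvK adj + 1) := Nat.mul_le_mul_right _ hlt
            rw [Nat.succ_mul] at hmul
            omega
          · rw [pvAdjGet_nil adj start hU] at hflt ⊢
            have hmul : pvCnt adj start (PySem.Set.add s n) * (pvK adj + 1) ≤
                pvCnt adj start s * (pvK adj + 1) := Nat.mul_le_mul_right _ hcle
            simp only [List.filter_nil, List.length_nil] at hflt ⊢
            omega
        rw [ih _ _ hnew]
        rw [pvRunA_filter adj start (d + 1) rest (pvAdjGet adj n) (PySem.Set.add s n)
          (PySem.Set.add s n) (fun x hx => hx)]
        simp only [pvRunA]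
        rw [pvD1_fresh adj start hc]
        simp
      · simp only [if_true]
        have : pvCnt adj start s * (pvK adj + 1) + rest.length < f := by
          simp only [List.length_cons] at hmu; omega
        rw [ih rest s this]
        simp only [pvRunA]
        rw [pvD1_seen adj start hc]
        simp

theorem pvSkip_step {seen : PySem.Set String} {ch : List (String × Int)} {i : Nat}
    (hlt : i < ch.length) (hcon : PySem.Set.contains seen ch[i].1 = true) :
    pvSkip seen ch i = pvSkip seen ch (i + 1) := by
  rw [pvSkip, dif_pos hlt, if_pos hcon]

theorem pvSkip_stop {seen : PySem.Set String} {ch : List (String × Int)} {i : Nat}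
    (hlt : i < ch.length) (hcon : ¬ PySem.Set.contains seen ch[i].1 = true) :
    pvSkip seen ch i = i := by
  rw [pvSkip, dif_pos hlt, if_neg hcon]

theorem pvSkip_out {seen : PySem.Set String} {ch : List (String × Int)} {i : Nat}
    (hlt : ¬ i < ch.length) : pvSkip seen ch i = i := by
  rw [pvSkip, dif_neg hlt]

theorem pvSkip_ge (seen : PySem.Set String) (ch : List (String × Int)) (i : Nat) :
    i ≤ pvSkip seen ch i := by
  induction i using pvSkip.induct (seen := seen) (ch := ch) with
  | case1 i h hcon ih => rw [pvSkip_step h hcon]; omega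
  | case2 i h hcon => rw [pvSkip_stop h hcon]
  | case3 i h => rw [pvSkip_out h]

theorem pvSkip_unseen' (seen : PySem.Set String) (ch : List (String × Int)) :
    ∀ i j : Nat, pvSkip seen ch i = j → (hj : j < ch.length) →
      PySem.Set.contains seen (ch[j].1) = false := by
  intro i
  induction i using pvSkip.induct (seen := seen) (ch := ch) with
  | case1 i hlt hcon ih =>
    intro j hj hjl
    rw [pvSkip_step hlt hcon] at hj
    exact ih j hj hjl
  | case2 i hlt hcon =>
    intro j hj hjl
    rw [pvSkip_stop hlt hcon] at hj
    subst hj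
    simpa using hcon
  | case3 i hlt =>
    intro j hj hjl
    rw [pvSkip_out hlt] at hj
    subst hj
    exact absurd hjl hlt

theorem pvSkip_drop (adj : List (String × List (String × Int))) (start : String)
    (seen : PySem.Set String) (ch : List (String × Int)) (d : Int) :
    ∀ i : Nat,
      pvDL adj start (ch.drop i) d seen = pvDL adj start (ch.drop (pvSkip seen ch i)) d seen := by
  intro i
  induction i using pvSkip.induct (seen := seen) (ch := ch) with
  | case1 i hlt hcon ih =>
    rw [pvSkip_step hlt hcon, ← ih]
    rw [List.drop_eq_getElem_cons hlt]
    unfold pvDL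
    simp only [pvFold, List.get_eq_getElem]
    rw [show pvDfs adj start (pvF adj start) ch[i].1 d seen = ([], seen) from
      pvD1_seen adj start hcon]
    simp
  | case2 i hlt hcon => rw [pvSkip_stop hlt hcon]
  | case3 i hlt => rw [pvSkip_out hlt]

theorem pvLoopB_eq (adj : List (String × List (String × Int))) (start : String) :
    ∀ (f : Nat) (frames : List (List (String × Int) × Int × Nat)) (s : PySem.Set String),
      pvCnt adj start s * (2 * pvK adj + 2) + pvW frames < f →
      pvLoopB adj start f frames s = pvRunB adj start frames s := by
  intro f
  induction f with
  | zero => intro frames s h; exact absurd h (Nat.not_lt_zero _)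
  | succ f ih =>
    intro frames s hmu
    cases frames with
    | nil => simp [pvLoopB, pvRunB]
    | cons fr rest =>
      obtain ⟨ch, d, i⟩ := fr
      simp only [pvLoopB]
      by_cases hj : pvSkip s ch i < ch.length
      · rw [dif_pos hj]
        have hch : PySem.Set.contains s (ch[pvSkip s ch i].1) = false :=
          pvSkip_unseen' s ch i _ rfl hj
        have hK := pvAdjGet_le_K adj (ch[pvSkip s ch i].1)
        have hij := pvSkip_ge s ch i
        have hWold : pvW ((ch, d, i) :: rest) = 2 * (ch.length - i) + 1 + pvW rest := by
          simp [pvW]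
        have hWnew : pvW ((pvAdjGet adj ch[pvSkip s ch i].1, d + 1, 0) ::
            (ch, d, pvSkip s ch i + 1) :: rest) =
            2 * (pvAdjGet adj ch[pvSkip s ch i].1).length + 1 +
              (2 * (ch.length - (pvSkip s ch i + 1)) + 1) + pvW rest := by
          simp [pvW]; ring
        have hnew : pvCnt adj start (PySem.Set.add s ch[pvSkip s ch i].1) * (2 * pvK adj + 2) +
            pvW ((pvAdjGet adj ch[pvSkip s ch i].1, d + 1, 0) ::
              (ch, d, pvSkip s ch i + 1) :: rest) < f := by
          rw [hWnew]
          rw [hWold] at hmu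
          by_cases hU : ch[pvSkip s ch i].1 ∈ pvU adj start
          · have hlt : pvCnt adj start (PySem.Set.add s ch[pvSkip s ch i].1) + 1 ≤
                pvCnt adj start s :=
              pvCnt_lt_add adj start hU (fun hm => by rw [pvCT hm] at hch; cases hch)
            have hmul : (pvCnt adj start (PySem.Set.add s ch[pvSkip s ch i].1) + 1) *
                (2 * pvK adj + 2) ≤ pvCnt adj start s * (2 * pvK adj + 2) :=
              Nat.mul_le_mul_right _ hlt
            rw [Nat.succ_mul] at hmul
            omega
          · have hmul : pvCnt adj start (PySem.Set.add s ch[pvSkip s ch i].1) *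
                (2 * pvK adj + 2) ≤ pvCnt adj start s * (2 * pvK adj + 2) :=
              Nat.mul_le_mul_right _
                (pvCnt_le_of_subset adj start (pvSubset_add s _))
            rw [pvAdjGet_nil adj start hU]
            simp only [List.length_nil]
            omega
        rw [ih _ _ hnew]
        simp only [pvRunB, List.drop_zero]
        rw [pvSkip_drop adj start s ch d i]
        rw [List.drop_eq_getElem_cons hj]
        unfold pvDL
        simp only [pvFold, List.get_eq_getElem]
        rw [show pvDfs adj start (pvF adj start) (ch[pvSkip s ch i].1) d s =
            ((ch[pvSkip s ch i].1, d) ::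
              (pvDL adj start (pvAdjGet adj ch[pvSkip s ch i].1) (d + 1)
                (PySem.Set.add s ch[pvSkip s ch i].1)).1,
             (pvDL adj start (pvAdjGet adj ch[pvSkip s ch i].1) (d + 1)
                (PySem.Set.add s ch[pvSkip s ch i].1)).2) from pvD1_fresh adj start hch]
        unfold pvDL
        simp [List.append_assoc]
      · rw [dif_neg hj]
        have : pvCnt adj start s * (2 * pvK adj + 2) + pvW rest < f := by
          have : pvW ((ch, d, i) :: rest) = 2 * (ch.length - i) + 1 + pvW rest := by
            simp [pvW]
          omega
        rw [ih rest s this]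
        simp only [pvRunB]
        rw [pvSkip_drop adj start s ch d i, List.drop_eq_nil_of_le (by omega)]
        simp [pvDL, pvFold]

-- ===== VERDICT (by name: the statement is the Claim_ definition above) =====
theorem python_dfs_spec : Claim_equal_python_dfs := by
  intro adj start _
  unfold Spec_python_dfs
  have hempty : PySem.Set.contains PySem.Set.empty start = false := rfl
  have hA : python_dfs adj start = (pvD1 adj start start 0 PySem.Set.empty).1 := by
    unfold python_dfs
    rw [pvLoopA_eq adj start _ _ _ (by simp [List.length_cons])]
    simp [pvRunA]
  have hB : python_dfs_alt adj start = (start, 0) ::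
      (pvDL adj start (pvAdjGet adj start) 1 (PySem.Set.add PySem.Set.empty start)).1 := by
    unfold python_dfs_alt
    have hK := pvAdjGet_le_K adj start
    show (start, 0) :: pvLoopB adj start
        (pvCnt adj start (PySem.Set.add PySem.Set.empty start) * (2 * pvK adj + 2) +
          2 * pvK adj + 2)
        [(pvAdjGet adj start, 1, 0)] (PySem.Set.add PySem.Set.empty start) = _
    rw [pvLoopB_eq adj start _ _ _ (by simp [pvW]; omega)]
    simp [pvRunB, List.drop_zero]
  rw [hA, hB]
  rw [pvD1_fresh adj start hempty]
  norm_num
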